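-- pv_equiv track=rewrite | github.com/pypi-data/pypi-mirror-158 | packages/halmoney/halmoney-1.3.5.tar.gz/halmoney-1.3.5/src/halmoney/youtil.py | delete_list1d_data_bystep
-- ===== SOURCE A (Python) =====
-- def delete_list1d_data_bystep(input_list, step, start=0):
-- 	"""
-- 	원하는 순서째의 자료를 ""으로 만드는것
-- 	"""
-- 	flag_no = 0
-- 	for num in range(start, len(input_list)):
-- 		flag_no = flag_no + 1
-- 		if flag_no == step:
-- 			input_list[num] = ""
-- 			flag_no = 0
-- 	return input_list
-- ===== SOURCE B (Python) =====
-- def delete_list1d_data_bystep(input_list, step, start=0):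
--     # Compute the affected indices directly with a strided range instead of
--     # scanning every element with a resetting counter. Mutates input_list in
--     # place, like A, and returns the same object.
--     if step >= 1:
--         for i in range(start + step - 1, len(input_list), step):
--             input_list[i] = ""
--     return input_list
-- ===== Notes on version B (the rewrite author's own statement) =====
-- stated objective: idiomatic
-- what changed: B replaces A's per-element scan with a resetting counter by a direct strided range over exactly the affected indices (guarded by step >= 1, where A's counter never fires).
import Mathlib
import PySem

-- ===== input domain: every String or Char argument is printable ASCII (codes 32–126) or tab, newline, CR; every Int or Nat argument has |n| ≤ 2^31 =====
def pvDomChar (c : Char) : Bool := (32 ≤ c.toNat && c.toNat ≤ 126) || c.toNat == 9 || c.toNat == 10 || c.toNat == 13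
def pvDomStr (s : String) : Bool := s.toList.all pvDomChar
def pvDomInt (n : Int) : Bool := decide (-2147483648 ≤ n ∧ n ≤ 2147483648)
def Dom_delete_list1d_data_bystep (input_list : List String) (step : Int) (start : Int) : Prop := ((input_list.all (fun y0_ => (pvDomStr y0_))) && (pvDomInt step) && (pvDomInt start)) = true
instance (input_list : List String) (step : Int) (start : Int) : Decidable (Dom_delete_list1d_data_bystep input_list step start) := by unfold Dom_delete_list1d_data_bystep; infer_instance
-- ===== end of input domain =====

-- B replaces A's per-element scan with a resetting counter by a direct strided range over
-- exactly the affected indices (same in-place mutation; equivalence is about the return value,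
-- which is the same mutated list).

-- ===== PORT A =====
-- literal transliteration: counter flag_no resets to 0 on each blanking; input_list[num] = ""
-- is PySem.List.pySetD (total form; Pre_ excludes exactly the inputs where Python raises IndexError)
def delete_list1d_data_bystep (input_list : List String) (step : Int) (start : Int) : List String :=
  ((PySem.List.pyRange start (input_list.length : Int) 1).foldl
    (fun (st : List String × Int) num =>
      let flag_no := st.2 + 1
      if flag_no == step then (PySem.List.pySetD st.1 num "", 0) else (st.1, flag_no))
    (input_list, 0)).1

-- ===== PORT B =====
def delete_list1d_data_bystep_alt (input_list : List String) (step : Int) (start : Int) : List String :=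
  if 1 ≤ step then
    (PySem.List.pyRange (start + step - 1) (input_list.length : Int) step).foldl
      (fun acc i => PySem.List.pySetD acc i "") input_list
  else input_list

-- ===== PRECONDITION & SPEC =====
-- Pre_ excludes exactly the inputs where the Python A (and B) raises IndexError:
-- step ≥ 1 with the first blanked index start+step-1 below -len(input_list).
def Pre_delete_list1d_data_bystep (input_list : List String) (step : Int) (start : Int) : Prop :=
  ¬ (1 ≤ step ∧ start + step - 1 < -(input_list.length : Int))
instance (input_list : List String) (step : Int) (start : Int) : Decidable (Pre_delete_list1d_data_bystep input_list step start) := by unfold Pre_delete_list1d_data_bystep; infer_instance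

def pvWitness_delete_list1d_data_bystep : List String × Int × Int := (["a", "b", "c", "d"], 2, 0)

def Spec_delete_list1d_data_bystep (input_list : List String) (step : Int) (start : Int) (out : List String) : Prop := out = delete_list1d_data_bystep_alt input_list step start
instance (input_list : List String) (step : Int) (start : Int) (out : List String) : Decidable (Spec_delete_list1d_data_bystep input_list step start out) := by unfold Spec_delete_list1d_data_bystep; infer_instance

-- ===== CLAIM (what is proved, stated in full; the proofs are below) =====
def Claim_equal_delete_list1d_data_bystep : Prop := ∀ (input_list : List String) (step : Int) (start : Int), Dom_delete_list1d_data_bystep input_list step start → Pre_delete_list1d_data_bystep input_list step start → Spec_delete_list1d_data_bystep input_list step start (delete_list1d_data_bystep input_list step start)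

-- ===== LEMMAS AND PROOFS =====

-- A positive-step range is empty when b ≤ a.
theorem pyRange_pos_nil (a b s : Int) (hs : 0 < s) (h : b ≤ a) :
    PySem.List.pyRange a b s = [] := by
  rw [PySem.List.pyRange_of_pos a b hs]
  simp [show ¬ a < b by omega]

-- A positive-step range peels its first element.
theorem pyRange_pos_cons (a b s : Int) (hs : 0 < s) (h : a < b) :
    PySem.List.pyRange a b s = a :: PySem.List.pyRange (a + s) b s := by
  rw [PySem.List.pyRange_of_pos a b hs, PySem.List.pyRange_of_pos (a + s) b hs]
  have hcount : (if a < b then ((b - a + s - 1) / s).toNat else 0)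
      = (if a + s < b then ((b - (a + s) + s - 1) / s).toNat else 0) + 1 := by
    rw [if_pos h]
    by_cases h2 : a + s < b
    · rw [if_pos h2]
      have hx : b - a + s - 1 = (b - (a + s) + s - 1) + 1 * s := by ring
      have hdiv : (b - a + s - 1) / s = (b - (a + s) + s - 1) / s + 1 := by
        rw [hx, Int.add_mul_ediv_right _ _ (by omega : s ≠ 0)]
      have hnn : 0 ≤ (b - (a + s) + s - 1) / s :=
        Int.ediv_nonneg (by omega) (by omega)
      omega
    · rw [if_neg h2]
      have hx : b - a + s - 1 = (b - a - 1) + 1 * s := by ring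
      have hdiv : (b - a + s - 1) / s = (b - a - 1) / s + 1 := by
        rw [hx, Int.add_mul_ediv_right _ _ (by omega : s ≠ 0)]
      have hz : (b - a - 1) / s = 0 := Int.ediv_eq_zero_of_lt (by omega) (by omega)
      omega
  rw [hcount, List.range_succ_eq_map, List.map_cons, List.map_map]
  have hfun : ((fun k : Nat => a + s * (k : Int)) ∘ Nat.succ)
      = (fun k : Nat => (a + s) + s * (k : Int)) := by
    funext k
    simp only [Function.comp_apply, Nat.succ_eq_add_one]
    push_cast
    ring
  rw [hfun]
  simp

-- step ≤ 0: A's counter (kept nonnegative) never equals step, so the list is never touched.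
theorem foldA_nonpos (step : Int) (hs : ¬ 1 ≤ step) :
    ∀ (l : List Int) (lst : List String) (flag : Int), 0 ≤ flag →
      (l.foldl
        (fun (st : List String × Int) num =>
          let flag_no := st.2 + 1
          if flag_no == step then (PySem.List.pySetD st.1 num "", 0) else (st.1, flag_no))
        (lst, flag)).1 = lst := by
  intro l
  induction l with
  | nil => intro lst flag _; rfl
  | cons x xs ih =>
      intro lst flag hf
      simp only [List.foldl_cons]
      have hne : ¬ (flag + 1 == step) = true := by
        simp only [beq_iff_eq]; omega
      simp only [if_neg hne]
      exact ih lst (flag + 1) (by omega)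

-- step ≥ 1: A's counting fold over range(a, b) with counter state flag equals
-- B's strided fold starting at the next index A will blank, a + (step - 1 - flag).
theorem foldA_eq_foldB (step b : Int) (hs : 1 ≤ step) :
    ∀ (n : Nat) (a flag : Int) (lst : List String), (b - a).toNat ≤ n →
      0 ≤ flag → flag < step →
      ((PySem.List.pyRange a b 1).foldl
        (fun (st : List String × Int) num =>
          let flag_no := st.2 + 1
          if flag_no == step then (PySem.List.pySetD st.1 num "", 0) else (st.1, flag_no))
        (lst, flag)).1
      = (PySem.List.pyRange (a + (step - 1 - flag)) b step).foldl
          (fun acc i => PySem.List.pySetD acc i "") lst := by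
  intro n
  induction n with
  | zero =>
      intro a flag lst hn h0 hlt
      have hba : b ≤ a := by omega
      rw [PySem.List.pyRange_one_eq_nil hba,
          pyRange_pos_nil _ _ _ (by omega) (by omega)]
      rfl
  | succ n ih =>
      intro a flag lst hn h0 hlt
      by_cases hab : a < b
      · rw [PySem.List.pyRange_one_cons hab]
        simp only [List.foldl_cons]
        by_cases htrig : flag + 1 = step
        · have hbeq : (flag + 1 == step) = true := by simp [htrig]
          simp only [hbeq, if_true]
          have hstart : a + (step - 1 - flag) = a := by omega
          rw [hstart, pyRange_pos_cons a b step (by omega) hab]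
          simp only [List.foldl_cons]
          have := ih (a + 1) 0 (PySem.List.pySetD lst a "") (by omega) (by omega) (by omega)
          rw [this]
          have : a + 1 + (step - 1 - 0) = a + step := by ring
          rw [this]
        · have hbeq : ¬ (flag + 1 == step) = true := by simp [htrig]
          simp only [if_neg hbeq]
          have := ih (a + 1) (flag + 1) lst (by omega) (by omega) (by omega)
          rw [this]
          have : a + 1 + (step - 1 - (flag + 1)) = a + (step - 1 - flag) := by ring
          rw [this]
      · rw [PySem.List.pyRange_one_eq_nil (by omega),
            pyRange_pos_nil _ _ _ (by omega) (by omega)]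
        rfl

-- ===== VERDICT (by name: the statement is the Claim_ definition above) =====
theorem delete_list1d_data_bystep_spec : Claim_equal_delete_list1d_data_bystep := by
  intro input_list step start _ _
  unfold Spec_delete_list1d_data_bystep delete_list1d_data_bystep delete_list1d_data_bystep_alt
  by_cases hs : 1 ≤ step
  · rw [if_pos hs]
    have := foldA_eq_foldB step (input_list.length : Int) hs
      ((input_list.length : Int) - start).toNat start 0 input_list (le_refl _)
      (by omega) (by omega)
    rw [this]
    have : start + (step - 1 - 0) = start + step - 1 := by ring
    rw [this]
  · rw [if_neg hs]
    exact foldA_nonpos step hs _ input_list 0 (by omega)
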